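-- pv_equiv track=rewrite | github.com/xzcube/test | Complexity/Complexity.py | anagramSolution3
-- ===== SOURCE A (Python) =====
-- def anagramSolution3(s1, s2):
--     """异序词检测"""
--     dic1 = {}
--     dic2 = {}
--     for i in s1:
--         dic1[i] = dic1.get(i, 0) + 1
--     for j in s2:
--         dic2[j] = dic2.get(j, 0) + 1
--     n = 0
--     for m in dic1:
--         try:
--             if dic1[m] == dic2[m]:
--                 n += 1
--         except:
--             return False
--     if n == len(dic1) == len(dic2):
--         return True
--     else:
--         return False
-- ===== SOURCE B (Python) =====
-- def anagramSolution3(s1, s2):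
--     """异序词检测 (sort-and-compare)"""
--     return sorted(s1) == sorted(s2)
-- ===== Notes on version B (the rewrite author's own statement) =====
-- stated objective: simpler
-- what changed: Replaces the two hand-built character-frequency dicts and the per-key matching loop with a single sort-and-compare: sorted(s1) == sorted(s2).
import Mathlib
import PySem

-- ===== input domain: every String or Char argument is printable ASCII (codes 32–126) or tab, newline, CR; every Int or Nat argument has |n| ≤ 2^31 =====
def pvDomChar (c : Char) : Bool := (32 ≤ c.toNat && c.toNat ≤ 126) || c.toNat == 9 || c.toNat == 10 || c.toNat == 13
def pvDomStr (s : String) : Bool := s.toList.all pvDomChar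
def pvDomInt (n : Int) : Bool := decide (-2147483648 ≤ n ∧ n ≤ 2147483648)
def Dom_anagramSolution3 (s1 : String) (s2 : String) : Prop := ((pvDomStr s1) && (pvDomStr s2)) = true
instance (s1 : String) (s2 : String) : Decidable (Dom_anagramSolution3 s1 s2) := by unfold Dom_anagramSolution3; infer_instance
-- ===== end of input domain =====

-- B changes the algorithm: sorted(s1) == sorted(s2) instead of A's two frequency dicts
-- and per-key matching loop; same return value, simpler code.

-- ===== PORT A =====
-- the 'for m in dic1: try: …' loop: returns none when the try raises (KeyError) and A returns False
def pvALoop (d1 d2 : PySem.Dict Char Int) : List Char → Int → Option Int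
  | [], n => some n
  | m :: rest, n =>
    match d1.get? m, d2.get? m with
    | some v1, some v2 => pvALoop d1 d2 rest (if v1 == v2 then n + 1 else n)
    | _, _ => none

def anagramSolution3 (s1 : String) (s2 : String) : Bool :=
  let dic1 := s1.toList.foldl (fun d i => d.insert i (d.getD i 0 + 1)) PySem.Dict.empty
  let dic2 := s2.toList.foldl (fun d j => d.insert j (d.getD j 0 + 1)) PySem.Dict.empty
  match pvALoop dic1 dic2 dic1.keys 0 with
  | none => false
  | some n => decide (n = (dic1.size : Int)) && decide (dic1.size = dic2.size)

-- ===== PORT B =====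
def anagramSolution3_alt (s1 : String) (s2 : String) : Bool :=
  decide (PySem.List.sorted s1.toList (fun x => x) false
        = PySem.List.sorted s2.toList (fun x => x) false)

-- ===== PRECONDITION & SPEC =====
def Spec_anagramSolution3 (s1 : String) (s2 : String) (out : Bool) : Prop := out = anagramSolution3_alt s1 s2
instance (s1 : String) (s2 : String) (out : Bool) : Decidable (Spec_anagramSolution3 s1 s2 out) := by unfold Spec_anagramSolution3; infer_instance

-- ===== CLAIM =====
def Claim_equal_anagramSolution3 : Prop := ∀ (s1 : String) (s2 : String), Dom_anagramSolution3 s1 s2 → Spec_anagramSolution3 s1 s2 (anagramSolution3 s1 s2)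

-- ===== LEMMAS AND PROOFS =====

-- abbreviation for A's counting loop
def pvCnt (l : List Char) : PySem.Dict Char Int :=
  l.foldl (fun d i => d.insert i (d.getD i 0 + 1)) PySem.Dict.empty

lemma pvCnt_getD (l : List Char) (c : Char) : (pvCnt l).getD c 0 = (l.count c : Int) := by
  simpa [pvCnt, PySem.Dict.getD_empty] using
    PySem.Dict.getD_foldl_insert_add_one l (PySem.Dict.empty : PySem.Dict Char Int) c

lemma pvCnt_keys (l : List Char) : (pvCnt l).keys = PySem.Set.ofList l := by
  simp [pvCnt, PySem.Dict.keys_foldl_insert, PySem.Set.ofList_eq_foldl, PySem.Set.update]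

lemma pvCnt_nodup (l : List Char) : (pvCnt l).keys.Nodup := by
  exact PySem.Dict.nodup_keys_foldl_insert _ _ _ PySem.Dict.nodup_keys_empty

lemma pvCnt_mem_keys (l : List Char) (c : Char) : c ∈ (pvCnt l).keys ↔ c ∈ l := by
  rw [pvCnt_keys]; exact PySem.Set.mem_ofList l c

lemma pvCnt_get? (l : List Char) (c : Char) (h : c ∈ l) :
    (pvCnt l).get? c = some (l.count c : Int) := by
  have hc : (pvCnt l).contains c = true := by
    rw [PySem.Dict.contains_iff_mem_keys, pvCnt_mem_keys]; exact h
  have hs : ((pvCnt l).get? c).isSome := by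
    rw [← PySem.Dict.contains_eq_isSome_get?]; exact hc
  obtain ⟨v, hv⟩ := Option.isSome_iff_exists.mp hs
  have := pvCnt_getD l c
  rw [PySem.Dict.getD_eq_get?_getD, hv] at this
  simp at this
  rw [hv, this]

lemma pvALoop_spec (d1 d2 : PySem.Dict Char Int) (ks : List Char) (n : Int)
    (h1 : ∀ m ∈ ks, (d1.get? m).isSome) :
    pvALoop d1 d2 ks n =
      if ∀ m ∈ ks, (d2.get? m).isSome then
        some (n + (ks.countP (fun m => d1.getD m 0 == d2.getD m 0) : Int))
      else none := by
  induction ks generalizing n with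
  | nil => simp [pvALoop]
  | cons m rest ih =>
    have hm : (d1.get? m).isSome := h1 m (List.mem_cons_self ..)
    obtain ⟨v1, hv1⟩ := Option.isSome_iff_exists.mp hm
    cases h2m : d2.get? m with
    | none =>
      have : ¬ ∀ x ∈ m :: rest, (d2.get? x).isSome := by
        intro hall
        have := hall m (List.mem_cons_self ..)
        rw [h2m] at this; simp at this
      simp only [pvALoop, hv1, h2m, this, if_false]
    | some v2 =>
      have hrest := ih (if v1 == v2 then n + 1 else n) (fun x hx => h1 x (List.mem_cons_of_mem _ hx))
      have hg1 : d1.getD m 0 = v1 := PySem.Dict.getD_of_get?_eq_some d1 0 hv1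
      have hg2 : d2.getD m 0 = v2 := PySem.Dict.getD_of_get?_eq_some d2 0 h2m
      by_cases hall : ∀ x ∈ rest, (d2.get? x).isSome
      · have hall' : ∀ x ∈ m :: rest, (d2.get? x).isSome := by
          intro x hx
          rcases List.mem_cons.mp hx with rfl | hx'
          · rw [h2m]; rfl
          · exact hall x hx'
        simp only [pvALoop, hv1, h2m, hrest, if_pos hall, if_pos hall',
          List.countP_cons, hg1, hg2]
        by_cases hv : v1 = v2
        · simp [hv]; ring
        · have : (v1 == v2) = false := by simp [hv]
          simp [this]
      · have hall' : ¬ ∀ x ∈ m :: rest, (d2.get? x).isSome := by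
          intro hc; exact hall (fun x hx => hc x (List.mem_cons_of_mem _ hx))
        simp only [pvALoop, hv1, h2m, hrest, if_neg hall, if_neg hall']

lemma pvA_iff (s1 s2 : String) :
    anagramSolution3 s1 s2 = true ↔ s1.toList.Perm s2.toList := by
  set l1 := s1.toList with hl1
  set l2 := s2.toList with hl2
  have h1 : ∀ m ∈ (pvCnt l1).keys, ((pvCnt l1).get? m).isSome := by
    intro m hm
    rw [pvCnt_get? l1 m ((pvCnt_mem_keys l1 m).mp hm)]; rfl
  have hloop := pvALoop_spec (pvCnt l1) (pvCnt l2) (pvCnt l1).keys 0 h1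
  have hAdef : anagramSolution3 s1 s2 =
      match pvALoop (pvCnt l1) (pvCnt l2) (pvCnt l1).keys 0 with
      | none => false
      | some n => decide (n = ((pvCnt l1).size : Int)) && decide ((pvCnt l1).size = (pvCnt l2).size) := by
    rfl
  constructor
  · intro hA
    rw [hAdef] at hA
    by_cases hall : ∀ m ∈ (pvCnt l1).keys, ((pvCnt l2).get? m).isSome
    · rw [hloop, if_pos hall] at hA
      simp only [Bool.and_eq_true, decide_eq_true_eq] at hA
      obtain ⟨hn, hsz⟩ := hA
      -- n = countP = size ⇒ every key of cnt l1 has equal counts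
      have hcount : ∀ m ∈ (pvCnt l1).keys, l1.count m = l2.count m := by
        have hcp : (pvCnt l1).keys.countP (fun m => (pvCnt l1).getD m 0 == (pvCnt l2).getD m 0)
            = (pvCnt l1).keys.length := by
          have : (0 : Int) + ((pvCnt l1).keys.countP _ : Int) = ((pvCnt l1).size : Int) := hn
          have hsz' : (pvCnt l1).size = (pvCnt l1).keys.length := by
            simp [PySem.Dict.size, PySem.Dict.keys]
          omega
        have hforall := List.countP_eq_length.mp hcp
        intro m hm
        have := hforall m hm
        rw [pvCnt_getD, pvCnt_getD] at this
        exact_mod_cast of_decide_eq_true this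
      -- membership of keys: keys of cnt l1 ⊆ keys of cnt l2, same length, nodup ⇒ perm
      have hsub : (pvCnt l1).keys ⊆ (pvCnt l2).keys := by
        intro m hm
        have := hall m hm
        rw [← PySem.Dict.contains_eq_isSome_get?] at this
        exact (PySem.Dict.contains_iff_mem_keys _ _).mp this
      have hlen : (pvCnt l1).keys.length = (pvCnt l2).keys.length := by
        simpa [PySem.Dict.size, PySem.Dict.keys] using hsz
      have hperm : (pvCnt l1).keys.Perm ((pvCnt l2).keys) := by
        have hsp := (pvCnt_nodup l1).subperm hsub
        exact hsp.perm_of_length_le (le_of_eq hlen.symm)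
      rw [List.perm_iff_count]
      intro c
      by_cases hc : c ∈ l1
      · exact hcount c ((pvCnt_mem_keys l1 c).mpr hc)
      · have hc2 : c ∉ l2 := by
          intro hc2
          have : c ∈ (pvCnt l1).keys := hperm.mem_iff.mpr ((pvCnt_mem_keys l2 c).mpr hc2)
          exact hc ((pvCnt_mem_keys l1 c).mp this)
        simp [List.count_eq_zero_of_not_mem hc, List.count_eq_zero_of_not_mem hc2]
    · rw [hloop, if_neg hall] at hA
      simp at hA
  · intro hperm
    rw [hAdef]
    have hcnt : ∀ c, l1.count c = l2.count c := List.perm_iff_count.mp hperm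
    have hall : ∀ m ∈ (pvCnt l1).keys, ((pvCnt l2).get? m).isSome := by
      intro m hm
      have hm1 : m ∈ l1 := (pvCnt_mem_keys l1 m).mp hm
      have hm2 : m ∈ l2 := hperm.mem_iff.mp hm1
      rw [pvCnt_get? l2 m hm2]; rfl
    rw [hloop, if_pos hall]
    have hcp : (pvCnt l1).keys.countP (fun m => (pvCnt l1).getD m 0 == (pvCnt l2).getD m 0)
        = (pvCnt l1).keys.length := by
      apply List.countP_eq_length.mpr
      intro m hm
      rw [pvCnt_getD, pvCnt_getD]
      exact decide_eq_true (by exact_mod_cast hcnt m)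
    have hkeysperm : (pvCnt l1).keys.Perm ((pvCnt l2).keys) := by
      rw [(List.perm_ext_iff_of_nodup (pvCnt_nodup l1) (pvCnt_nodup l2))]
      intro c
      rw [pvCnt_mem_keys, pvCnt_mem_keys]
      exact hperm.mem_iff
    have hsz1 : (pvCnt l1).size = (pvCnt l1).keys.length := by
      simp [PySem.Dict.size, PySem.Dict.keys]
    have hsz2 : (pvCnt l2).size = (pvCnt l2).keys.length := by
      simp [PySem.Dict.size, PySem.Dict.keys]
    simp only [Bool.and_eq_true, decide_eq_true_eq]
    constructor
    · rw [hcp, hsz1]; ring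
    · rw [hsz1, hsz2]; exact hkeysperm.length_eq

lemma pvB_iff (s1 s2 : String) :
    anagramSolution3_alt s1 s2 = true ↔ s1.toList.Perm s2.toList := by
  simp only [anagramSolution3_alt, decide_eq_true_eq]
  exact PySem.List.sorted_id_eq_sorted_id_iff_perm _ _

-- ===== VERDICT =====
theorem anagramSolution3_spec : Claim_equal_anagramSolution3 := by
  intro s1 s2 _
  unfold Spec_anagramSolution3
  rw [Bool.eq_iff_iff, pvA_iff, pvB_iff]
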